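-- pv_equiv track=rewrite | github.com/get-offer-in-qa-auto/pipe_team_open_msr_auto | src/api/generators/mod30.py | luhn_mod_n_is_valid
-- ===== SOURCE A (Python) =====
-- from typing import Final
--
-- MOD30_ALPHABET: Final[str] = "0123456789ACDEFGHJKLMNPRTUVWXY"
--
-- def luhn_mod_n_is_valid(value: str, alphabet: str = MOD30_ALPHABET) -> bool:
--     """
--     Проверяет строку, где последний символ — check-character.
--     """
--     n = len(alphabet)
--     if n % 2 != 0 or len(value) < 2:
--         return False
--
--     idx = {ch: i for i, ch in enumerate(alphabet)}
--     factor = 1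
--     total = 0
--
--     for ch in reversed(value):
--         if ch not in idx:
--             return False
--         code_point = idx[ch]
--         addend = factor * code_point
--         factor = 1 if factor == 2 else 2
--         addend = (addend // n) + (addend % n)
--         total += addend
--
--     return (total % n) == 0
-- ===== SOURCE B (Python) =====
-- MOD30_ALPHABET = "0123456789ACDEFGHJKLMNPRTUVWXY"
--
-- def luhn_mod_n_is_valid(value, alphabet=MOD30_ALPHABET):
--     n = len(alphabet)
--     if n % 2 != 0 or len(value) < 2:
--         return False
--     idx = {ch: i for i, ch in enumerate(alphabet)}
--     rev = value[::-1]
--     if any(ch not in idx for ch in rev):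
--         return False
--     kept = sum(idx[ch] for ch in rev[0::2])
--     doubled = sum(2 * idx[ch] // n + 2 * idx[ch] % n for ch in rev[1::2])
--     return (kept + doubled) % n == 0
-- ===== Notes on version B (the rewrite author's own statement) =====
-- stated objective: alternative
-- what changed: Replaces the single stateful pass with a toggling factor by an upfront membership check of all characters followed by two separate passes: a direct sum of index values over the even positions of the reversed string and a doubled-digit sum over the odd positions.
import Mathlib
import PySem

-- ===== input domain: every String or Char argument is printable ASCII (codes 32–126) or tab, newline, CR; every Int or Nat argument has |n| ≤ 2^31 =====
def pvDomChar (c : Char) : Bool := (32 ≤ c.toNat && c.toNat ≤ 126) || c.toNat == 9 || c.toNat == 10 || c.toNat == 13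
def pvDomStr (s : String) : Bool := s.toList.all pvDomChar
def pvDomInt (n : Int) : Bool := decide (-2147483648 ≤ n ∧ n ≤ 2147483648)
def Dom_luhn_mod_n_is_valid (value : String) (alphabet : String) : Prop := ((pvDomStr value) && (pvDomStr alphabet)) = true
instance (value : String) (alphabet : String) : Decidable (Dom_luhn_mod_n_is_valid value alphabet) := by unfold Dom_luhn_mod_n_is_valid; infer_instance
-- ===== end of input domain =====

-- B replaces A's single stateful pass (toggling factor) by an upfront membership check
-- and two separate positional-parity passes over the reversed string; same cost, no speed claim.

-- ===== PORT A =====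
-- the for-loop of A: state = (factor, total), early `return False` on a missing character
def luhnGoA (idx : PySem.Dict Char Int) (n : Int) : List Char → Int → Int → Bool
  | [], _, total => PySem.Int.mod total n == 0
  | ch :: rest, factor, total =>
    match idx.get? ch with
    | none => false
    | some c =>
      let addend := factor * c
      let factor' : Int := if factor == 2 then 1 else 2
      let addend' := PySem.Int.floordiv addend n + PySem.Int.mod addend n
      luhnGoA idx n rest factor' (total + addend')

def luhn_mod_n_is_valid (value : String) (alphabet : String) : Bool :=
  let n : Int := PySem.Str.len alphabet
  if PySem.Int.mod n 2 ≠ 0 ∨ PySem.Str.len value < 2 then false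
  else
    let idx : PySem.Dict Char Int :=
      (PySem.List.enumerate alphabet.toList 0).foldl (fun d p => d.insert p.2 p.1) PySem.Dict.empty
    luhnGoA idx n value.toList.reverse 1 0

-- ===== PORT B =====
-- rev[0::2] (the even positions); rev[1::2] is everyOther rev.tail — exact port of a step-2 slice
def everyOther {α : Type} : List α → List α
  | [] => []
  | [x] => [x]
  | x :: _ :: rest => x :: everyOther rest

def luhn_mod_n_is_valid_alt (value : String) (alphabet : String) : Bool :=
  let n : Int := PySem.Str.len alphabet
  if PySem.Int.mod n 2 ≠ 0 ∨ PySem.Str.len value < 2 then false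
  else
    let idx : PySem.Dict Char Int :=
      (PySem.List.enumerate alphabet.toList 0).foldl (fun d p => d.insert p.2 p.1) PySem.Dict.empty
    let rev := value.toList.reverse
    if rev.any (fun ch => !(idx.contains ch)) then false
    else
      let kept := (everyOther rev).foldl (fun s ch => s + idx.getD ch 0) 0
      let doubled := (everyOther rev.tail).foldl
        (fun s ch => s + (PySem.Int.floordiv (2 * idx.getD ch 0) n + PySem.Int.mod (2 * idx.getD ch 0) n)) 0
      PySem.Int.mod (kept + doubled) n == 0

-- ===== PRECONDITION & SPEC =====
def Spec_luhn_mod_n_is_valid (value : String) (alphabet : String) (out : Bool) : Prop := out = luhn_mod_n_is_valid_alt value alphabet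
instance (value : String) (alphabet : String) (out : Bool) : Decidable (Spec_luhn_mod_n_is_valid value alphabet out) := by unfold Spec_luhn_mod_n_is_valid; infer_instance

-- ===== CLAIM (what is proved, stated in full; the proofs are below) =====
def Claim_equal_luhn_mod_n_is_valid : Prop := ∀ (value : String) (alphabet : String), Dom_luhn_mod_n_is_valid value alphabet → Spec_luhn_mod_n_is_valid value alphabet (luhn_mod_n_is_valid value alphabet)

-- ===== LEMMAS AND PROOFS =====

theorem everyOther_cons {α : Type} (x : α) (xs : List α) :
    everyOther (x :: xs) = x :: everyOther xs.tail := by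
  cases xs <;> rfl

-- every value stored by the index-building fold over `enumerate l s` lies in [min(s,old-bounds), s + len l)
theorem build_bound (l : List Char) : ∀ (s : Int) (d : PySem.Dict Char Int),
    0 ≤ s →
    (∀ ch c, d.get? ch = some c → 0 ≤ c ∧ c < s) →
    ∀ ch c,
      ((PySem.List.enumerate l s).foldl (fun d p => d.insert p.2 p.1) d).get? ch = some c →
      0 ≤ c ∧ c < s + l.length := by
  induction l with
  | nil => intro s d hs hinv ch c h
           simp [PySem.List.enumerate] at h
           have := hinv ch c h; omega
  | cons x xs ih =>
      intro s d hs hinv ch c h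
      rw [PySem.List.enumerate_cons] at h
      simp only [List.foldl_cons] at h
      have := ih (s + 1) (d.insert x s) (by omega)
        (by intro ch' c' h'
            rw [PySem.Dict.get?_insert] at h'
            split at h'
            · cases h'; omega
            · have := hinv ch' c' h'; omega)
        ch c h
      simp only [List.length_cons] at *
      push_cast at *
      omega

theorem go_false (idx : PySem.Dict Char Int) (n : Int) :
    ∀ (cs : List Char) (factor total : Int),
      (∃ ch ∈ cs, idx.get? ch = none) → luhnGoA idx n cs factor total = false := by
  intro cs
  induction cs with
  | nil => intro _ _ h; simp at h
  | cons x xs ih =>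
      intro factor total h
      obtain ⟨ch, hmem, hnone⟩ := h
      rw [luhnGoA]
      cases hx : idx.get? x with
      | none => rfl
      | some c =>
        simp only []
        apply ih
        rcases List.mem_cons.mp hmem with rfl | hm
        · rw [hx] at hnone; cases hnone
        · exact ⟨ch, hm, hnone⟩

-- the two parity sums of B (as map-sums)
def keptSum (idx : PySem.Dict Char Int) (cs : List Char) : Int :=
  ((everyOther cs).map (fun ch => idx.getD ch 0)).sum
def dblSum (idx : PySem.Dict Char Int) (n : Int) (cs : List Char) : Int :=
  ((everyOther cs).map (fun ch =>
    PySem.Int.floordiv (2 * idx.getD ch 0) n + PySem.Int.mod (2 * idx.getD ch 0) n)).sum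

theorem go_eq (idx : PySem.Dict Char Int) (n : Int)
    (hb : ∀ ch c, idx.get? ch = some c → 0 ≤ c ∧ c < n) :
    ∀ (cs : List Char), (∀ ch ∈ cs, (idx.get? ch).isSome) → ∀ total : Int,
      (luhnGoA idx n cs 1 total =
        (PySem.Int.mod (total + (keptSum idx cs + dblSum idx n cs.tail)) n == 0)) ∧
      (luhnGoA idx n cs 2 total =
        (PySem.Int.mod (total + (keptSum idx cs.tail + dblSum idx n cs)) n == 0)) := by
  intro cs
  induction cs with
  | nil =>
      intro _ total
      constructor <;> simp [luhnGoA, keptSum, dblSum, everyOther]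
  | cons x xs ih =>
      intro hall total
      have hx : (idx.get? x).isSome := hall x (List.mem_cons_self ..)
      obtain ⟨c, hc⟩ := Option.isSome_iff_exists.mp hx
      have hcb := hb x c hc
      have hgetD : idx.getD x 0 = c := PySem.Dict.getD_of_get?_eq_some idx 0 hc
      have hrest : ∀ ch ∈ xs, (idx.get? ch).isSome := fun ch h => hall ch (List.mem_cons_of_mem _ h)
      have hK : keptSum idx (x :: xs) = c + keptSum idx xs.tail := by
        simp [keptSum, everyOther_cons, hgetD]
      have hD : dblSum idx n (x :: xs) =
          (PySem.Int.floordiv (2 * c) n + PySem.Int.mod (2 * c) n) + dblSum idx n xs.tail := by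
        simp [dblSum, everyOther_cons, hgetD]
      have hnpos : 0 < n := by omega
      constructor
      · rw [luhnGoA, hc]
        simp only [show ((1:Int) == 2) = false from rfl, Bool.false_eq_true, if_false]
        have h1 : PySem.Int.floordiv (1 * c) n + PySem.Int.mod (1 * c) n = c := by
          rw [one_mul, PySem.Int.floordiv_eq_ediv_of_pos hnpos, PySem.Int.mod_eq_emod_of_pos hnpos]
          rw [Int.ediv_eq_zero_of_lt hcb.1 hcb.2, Int.emod_eq_of_lt hcb.1 hcb.2]
          ring
        rw [h1, (ih hrest (total + c)).2, hK]
        have : total + c + (keptSum idx xs.tail + dblSum idx n xs) =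
            total + (c + keptSum idx xs.tail + dblSum idx n (x :: xs).tail) := by
          simp only [List.tail_cons]; ring
        rw [this]
      · rw [luhnGoA, hc]
        simp only [show ((2:Int) == 2) = true from rfl, if_true]
        rw [(ih hrest (total + (PySem.Int.floordiv (2 * c) n + PySem.Int.mod (2 * c) n))).1, hD]
        have : total + (PySem.Int.floordiv (2 * c) n + PySem.Int.mod (2 * c) n) +
            (keptSum idx xs + dblSum idx n xs.tail) =
            total + (keptSum idx (x :: xs).tail +
              ((PySem.Int.floordiv (2 * c) n + PySem.Int.mod (2 * c) n) + dblSum idx n xs.tail)) := by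
          simp only [List.tail_cons]; ring
        rw [this]

-- ===== VERDICT (by name: the statement is the Claim_ definition above) =====
theorem luhn_mod_n_is_valid_spec : Claim_equal_luhn_mod_n_is_valid := by
  intro value alphabet _
  unfold Spec_luhn_mod_n_is_valid luhn_mod_n_is_valid luhn_mod_n_is_valid_alt
  set n : Int := PySem.Str.len alphabet with hn
  by_cases hg : PySem.Int.mod n 2 ≠ 0 ∨ PySem.Str.len value < 2
  · rw [if_pos hg, if_pos hg]
  · simp only [if_neg hg]
    set idx : PySem.Dict Char Int :=
      (PySem.List.enumerate alphabet.toList 0).foldl (fun d p => d.insert p.2 p.1) PySem.Dict.empty with hidx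
    set rev := value.toList.reverse with hrev
    have hb : ∀ ch c, idx.get? ch = some c → 0 ≤ c ∧ c < n := by
      intro ch c h
      have := build_bound alphabet.toList 0 PySem.Dict.empty le_rfl
        (by intro ch' c' h'; rw [PySem.Dict.get?_empty] at h'; cases h') ch c (hidx ▸ h)
      have hlen : n = (alphabet.toList.length : Int) := by
        rw [hn, PySem.Str.len_eq]
      omega
    by_cases hmiss : ∃ ch ∈ rev, idx.get? ch = none
    · rw [go_false idx n rev 1 0 hmiss]
      have : rev.any (fun ch => !(idx.contains ch)) = true := by
        obtain ⟨ch, hm, hch⟩ := hmiss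
        refine List.any_eq_true.mpr ⟨ch, hm, ?_⟩
        rw [PySem.Dict.contains_eq_isSome_get?, hch]; rfl
      simp [this]
    · push Not at hmiss
      have hall : ∀ ch ∈ rev, (idx.get? ch).isSome := by
        intro ch h
        cases hx : idx.get? ch with
        | none => exact absurd hx (hmiss ch h)
        | some _ => rfl
      have hany : rev.any (fun ch => !(idx.contains ch)) = false := by
        rw [List.any_eq_false]
        intro ch h
        rw [PySem.Dict.contains_eq_isSome_get?, hall ch h]
        simp
      simp only [hany, Bool.false_eq_true, if_false]
      rw [(go_eq idx n hb rev hall 0).1]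
      rw [PySem.List.foldl_add, PySem.List.foldl_add]
      simp only [zero_add]
      rfl
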